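-- pv_equiv track=rewrite | github.com/posl/comment_recommendation | script/split_gen/3_time/en/152_C/9.py | count_bigger_than_all_previous_numbers
-- ===== SOURCE A (Python) =====
-- def count_bigger_than_all_previous_numbers(numbers):
--     count = 0
--     min = numbers[0]
--     for number in numbers:
--         if number <= min:
--             min = number
--             count += 1
--     return count
-- ===== SOURCE B (Python) =====
-- def count_bigger_than_all_previous_numbers(numbers):
--     m = numbers[0]
--     prefix_min = []
--     for n in numbers:
--         m = min(m, n)
--         prefix_min.append(m)
--     return sum(1 for n, pm in zip(numbers, prefix_min) if n == pm)
-- ===== Notes on version B (the rewrite author's own statement) =====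
-- stated objective: alternative
-- what changed: Replaces the single stateful record-keeping loop by a two-phase decomposition: build the prefix-minimum sequence in one pass, then count positions where the element equals its prefix minimum via zip.
import Mathlib
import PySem

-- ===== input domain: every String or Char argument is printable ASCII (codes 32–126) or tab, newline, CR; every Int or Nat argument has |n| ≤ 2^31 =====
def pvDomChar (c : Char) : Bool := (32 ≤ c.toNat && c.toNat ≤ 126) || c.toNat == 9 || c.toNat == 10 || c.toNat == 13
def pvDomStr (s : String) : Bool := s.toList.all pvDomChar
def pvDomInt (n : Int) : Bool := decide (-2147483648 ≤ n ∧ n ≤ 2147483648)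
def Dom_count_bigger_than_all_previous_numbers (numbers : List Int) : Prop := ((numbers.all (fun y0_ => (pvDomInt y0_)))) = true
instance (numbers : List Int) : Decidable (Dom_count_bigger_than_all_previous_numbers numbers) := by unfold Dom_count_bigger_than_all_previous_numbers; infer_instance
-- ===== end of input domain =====

-- B replaces A's single stateful record-keeping loop by a two-phase decomposition
-- (prefix-minimum sequence, then a zip count); alternative structure, same O(n) cost.


-- ===== PORT A =====
-- A's loop: running min and count, update on number ≤ min
def aLoop : List Int → Int → Int → Int
  | [], _, count => count
  | n :: rest, m, count => if n ≤ m then aLoop rest n (count + 1) else aLoop rest m count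

def count_bigger_than_all_previous_numbers (numbers : List Int) : Int :=
  match PySem.List.pyGet? numbers 0 with   -- numbers[0]; none = IndexError, excluded by Pre_
  | none => 0
  | some m0 => aLoop numbers m0 0

-- ===== PORT B =====
-- first pass: prefix-minimum sequence starting from seed m
def prefixMins : Int → List Int → List Int
  | _, [] => []
  | m, n :: rest => let m' := min m n; m' :: prefixMins m' rest

def count_bigger_than_all_previous_numbers_alt (numbers : List Int) : Int :=
  match PySem.List.pyGet? numbers 0 with   -- numbers[0]; none = IndexError, excluded by Pre_
  | none => 0
  | some m0 =>
    ((numbers.zip (prefixMins m0 numbers)).countP (fun p => p.1 == p.2) : Int)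

-- ===== PRECONDITION & SPEC =====
-- A raises IndexError on the empty list (numbers[0]); B does too.
def Pre_count_bigger_than_all_previous_numbers (numbers : List Int) : Prop := numbers ≠ []
instance (numbers : List Int) : Decidable (Pre_count_bigger_than_all_previous_numbers numbers) := by unfold Pre_count_bigger_than_all_previous_numbers; infer_instance
def pvWitness_count_bigger_than_all_previous_numbers : List Int := [3, 1, 2]

def Spec_count_bigger_than_all_previous_numbers (numbers : List Int) (out : Int) : Prop := out = count_bigger_than_all_previous_numbers_alt numbers
instance (numbers : List Int) (out : Int) : Decidable (Spec_count_bigger_than_all_previous_numbers numbers out) := by unfold Spec_count_bigger_than_all_previous_numbers; infer_instance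

-- ===== CLAIM (what is proved, stated in full; the proofs are below) =====
def Claim_equal_count_bigger_than_all_previous_numbers : Prop := ∀ (numbers : List Int), Dom_count_bigger_than_all_previous_numbers numbers → Pre_count_bigger_than_all_previous_numbers numbers → Spec_count_bigger_than_all_previous_numbers numbers (count_bigger_than_all_previous_numbers numbers)

-- ===== LEMMAS AND PROOFS =====
lemma aLoop_eq_countZip (l : List Int) : ∀ (m c : Int),
    aLoop l m c = c + ((l.zip (prefixMins m l)).countP (fun p => p.1 == p.2) : Int) := by
  induction l with
  | nil => intro m c; simp [aLoop, prefixMins]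
  | cons n rest ih =>
    intro m c
    by_cases h : n ≤ m
    · have hmin : min m n = n := min_eq_right h
      simp only [aLoop, prefixMins, if_pos h, hmin, List.zip_cons_cons, List.countP_cons,
        BEq.rfl, if_pos, ih]
      push_cast
      ring
    · have hmin : min m n = m := min_eq_left (le_of_not_ge h)
      have hne : (n == m) = false := by
        simp only [beq_eq_false_iff_ne]; intro e; exact h (le_of_eq e)
      simp only [aLoop, prefixMins, if_neg h, hmin, List.zip_cons_cons, List.countP_cons,
        hne, ih]
      simp

-- ===== VERDICT (by name: the statement is the Claim_ definition above) =====
theorem count_bigger_than_all_previous_numbers_spec : Claim_equal_count_bigger_than_all_previous_numbers := by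
  intro numbers _ hpre
  unfold Spec_count_bigger_than_all_previous_numbers
  unfold count_bigger_than_all_previous_numbers count_bigger_than_all_previous_numbers_alt
  cases numbers with
  | nil => exact absurd rfl hpre
  | cons n rest =>
    simp only [PySem.List.pyGet?, PySem.List.pyIdx?]
    norm_num [aLoop_eq_countZip]
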